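-- pv_equiv track=rewrite | github.com/kosa12/aoc2024 | 18/part.py | create_grid
-- ===== SOURCE A (Python) =====
-- def create_grid(data, lim=1024, n=70):
--     bytes = set()
--     for line in data[:lim]:
--         x = int(line.split(",")[0])
--         y = int(line.split(",")[1])
--         bytes.add((y, x))
--     grid = "#" * (n + 3) + "\n"
--     for i in range(n + 1):
--         grid += "#"
--         for j in range(n + 1):
--             if (i, j) in bytes:
--                 grid += "#"
--             else:
--                 grid += "."
--         grid += "#\n"
--     grid += "#" * (n + 3)
--     return grid.split("\n")
-- ===== SOURCE B (Python) =====
-- def create_grid(data, lim=1024, n=70):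
--     grid = [["."] * (n + 1) for _ in range(n + 1)]
--     for line in data[:lim]:
--         parts = line.split(",")
--         x = int(parts[0])
--         y = int(parts[1])
--         if 0 <= x <= n and 0 <= y <= n:
--             grid[y][x] = "#"
--     border = "#" * (n + 3)
--     return [border] + ["#" + "".join(row) + "#" for row in grid] + [border]
-- ===== Notes on version B (the rewrite author's own statement) =====
-- stated objective: alternative
-- what changed: B scatters each parsed byte directly into a mutable (n+1)x(n+1) character grid (bound-checked) and emits the bordered rows as a list, instead of A's building a set of coordinates, querying it once per cell while concatenating one big newline-joined string, and splitting that string at the end.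
import Mathlib
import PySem

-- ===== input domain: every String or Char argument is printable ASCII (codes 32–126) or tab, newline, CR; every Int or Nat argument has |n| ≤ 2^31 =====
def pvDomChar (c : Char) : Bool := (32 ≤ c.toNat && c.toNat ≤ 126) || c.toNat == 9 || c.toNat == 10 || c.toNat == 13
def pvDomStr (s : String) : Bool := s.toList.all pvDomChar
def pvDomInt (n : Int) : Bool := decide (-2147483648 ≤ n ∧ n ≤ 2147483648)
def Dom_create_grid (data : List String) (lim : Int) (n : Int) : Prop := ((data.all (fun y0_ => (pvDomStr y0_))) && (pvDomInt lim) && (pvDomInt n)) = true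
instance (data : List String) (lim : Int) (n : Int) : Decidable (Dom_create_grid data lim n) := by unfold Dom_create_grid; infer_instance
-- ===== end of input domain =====

-- B scatters the parsed bytes directly into a list-of-rows character grid and emits the
-- bordered rows as a list, instead of A's coordinate set + per-cell membership test +
-- one big string concatenation split at '\n' (alternative decomposition, same cost).

-- shared parse of one line: x = int(line.split(",")[0]); y = int(line.split(",")[1]); none = Python raises
def pvParseXY (line : String) : Option (Int × Int) :=
  let parts := PySem.Chars.splitOn line.toList [',']
  match (PySem.List.pyGet? parts 0).bind PySem.Int.ofChars?,
        (PySem.List.pyGet? parts 1).bind PySem.Int.ofChars? with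
  | some x, some y => some (x, y)
  | _, _ => none

-- ===== PORT A =====
def create_grid (data : List String) (lim : Int) (n : Int) : List String :=
  let bytes : PySem.Set (Int × Int) :=
    (PySem.List.slice data none (some lim)).foldl
      (fun b line =>
        match pvParseXY line with
        | some (x, y) => PySem.Set.add b (y, x)
        | none => b) PySem.Set.empty
  let grid : List Char := PySem.List.pyRepeat ['#'] (n + 3) ++ ['\n']
  let grid :=
    (PySem.List.pyRange 0 (n + 1)).foldl
      (fun g i =>
        let g := g ++ ['#']
        let g :=
          (PySem.List.pyRange 0 (n + 1)).foldl
            (fun g j =>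
              if PySem.Set.contains bytes (i, j) then g ++ ['#'] else g ++ ['.']) g
        g ++ ['#', '\n']) grid
  let grid := grid ++ PySem.List.pyRepeat ['#'] (n + 3)
  (PySem.Chars.splitOn grid ['\n']).map String.ofList


-- ===== PORT B =====
def create_grid_alt (data : List String) (lim : Int) (n : Int) : List String :=
  let grid0 : List (List Char) :=
    List.replicate (n + 1).toNat (List.replicate (n + 1).toNat '.')
  let grid :=
    (PySem.List.slice data none (some lim)).foldl
      (fun grid line =>
        match pvParseXY line with
        | some (x, y) =>
            if 0 ≤ x ∧ x ≤ n ∧ 0 ≤ y ∧ y ≤ n then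
              grid.modify y.toNat (fun row => row.set x.toNat '#')
            else grid
        | none => grid) grid0
  let border := String.ofList (PySem.List.pyRepeat ['#'] (n + 3))
  border :: grid.map (fun row => String.ofList ('#' :: row ++ ['#'])) ++ [border]


-- ===== PRECONDITION & SPEC =====
-- Pre_ excludes exactly the inputs where Python A raises while parsing one of the first
-- lim lines: no comma (IndexError on [1]) or a comma-field that is not an int literal (ValueError).
def Pre_create_grid (data : List String) (lim : Int) (n : Int) : Prop :=
  ∀ line ∈ PySem.List.slice data none (some lim), (pvParseXY line).isSome = true
instance (data : List String) (lim : Int) (n : Int) : Decidable (Pre_create_grid data lim n) := by unfold Pre_create_grid; infer_instance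
def pvWitness_create_grid : List String × Int × Int := (["1,2", "0,0", "5,1"], 2, 3)

def Spec_create_grid (data : List String) (lim : Int) (n : Int) (out : List String) : Prop := out = create_grid_alt data lim n
instance (data : List String) (lim : Int) (n : Int) (out : List String) : Decidable (Spec_create_grid data lim n out) := by unfold Spec_create_grid; infer_instance

-- ===== CLAIM (what is proved, stated in full; the proofs are below) =====
def Claim_equal_create_grid : Prop := ∀ (data : List String) (lim : Int) (n : Int), Dom_create_grid data lim n → Pre_create_grid data lim n → Spec_create_grid data lim n (create_grid data lim n)

-- ===== LEMMAS AND PROOFS =====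

def pvPairsAll (lines : List String) : List (Int × Int) :=
  lines.filterMap (fun line => (pvParseXY line).map (fun p => (p.2, p.1)))
def pvPairs (lines : List String) (n : Int) : List (Int × Int) :=
  lines.filterMap (fun line =>
    match pvParseXY line with
    | some (x, y) => if 0 ≤ x ∧ x ≤ n ∧ 0 ≤ y ∧ y ≤ n then some (y, x) else none
    | none => none)

lemma memA (lines : List String) (b : PySem.Set (Int × Int)) (p : Int × Int) :
    p ∈ lines.foldl
      (fun b line =>
        match pvParseXY line with
        | some (x, y) => PySem.Set.add b (y, x)
        | none => b) b ↔ p ∈ b ∨ p ∈ pvPairsAll lines := by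
  induction lines generalizing b with
  | nil => simp [pvPairsAll]
  | cons line rest ih =>
    simp only [List.foldl_cons, pvPairsAll, List.filterMap_cons]
    cases h : pvParseXY line with
    | none => simpa [h, pvPairsAll] using ih b
    | some xy =>
      obtain ⟨x, y⟩ := xy
      show p ∈ rest.foldl _ (PySem.Set.add b (y, x)) ↔ _
      rw [ih (PySem.Set.add b (y, x))]
      simp only [Option.map_some, List.mem_cons, PySem.Set.mem_add, pvPairsAll]
      tauto

lemma mem_pairs_iff (lines : List String) (n i j : Int)
    (hi0 : 0 ≤ i) (hi : i ≤ n) (hj0 : 0 ≤ j) (hj : j ≤ n) :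
    ((i, j) ∈ pvPairsAll lines ↔ (i, j) ∈ pvPairs lines n) := by
  induction lines with
  | nil => simp [pvPairsAll, pvPairs]
  | cons line rest ih =>
    simp only [pvPairsAll, pvPairs, List.filterMap_cons] at *
    cases h : pvParseXY line with
    | none => simpa using ih
    | some xy =>
      obtain ⟨x, y⟩ := xy
      by_cases hb : 0 ≤ x ∧ x ≤ n ∧ 0 ≤ y ∧ y ≤ n
      · simp [hb, ih]
      · simp only [hb, if_false, Option.map_some]
        rw [List.mem_cons]
        constructor
        · rintro (heq | hm)
          · exfalso; apply hb
            cases heq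
            exact ⟨hj0, hj, hi0, hi⟩
          · exact ih.mp hm
        · intro hm; right; exact ih.mpr hm

def pvStepB (n : Int) (grid : List (List Char)) (line : String) : List (List Char) :=
  match pvParseXY line with
  | some (x, y) =>
      if 0 ≤ x ∧ x ≤ n ∧ 0 ≤ y ∧ y ≤ n then
        grid.modify y.toNat (fun row => row.set x.toNat '#')
      else grid
  | none => grid

lemma lengthB (n : Int) (lines : List String) (grid : List (List Char)) :
    (lines.foldl (pvStepB n) grid).length = grid.length := by
  induction lines generalizing grid with
  | nil => rfl
  | cons line rest ih =>
    rw [List.foldl_cons, ih]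
    unfold pvStepB
    cases pvParseXY line with
    | none => rfl
    | some xy =>
      obtain ⟨x, y⟩ := xy
      by_cases hb : 0 ≤ x ∧ x ≤ n ∧ 0 ≤ y ∧ y ≤ n
      · simp [hb, List.length_modify]
      · simp [hb]

lemma rowLenB (n : Int) (lines : List String) (grid : List (List Char)) (m : Nat)
    (h : ∀ r ∈ grid, r.length = m) : ∀ r ∈ lines.foldl (pvStepB n) grid, r.length = m := by
  induction lines generalizing grid with
  | nil => exact h
  | cons line rest ih =>
    rw [List.foldl_cons]
    apply ih
    unfold pvStepB
    cases pvParseXY line with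
    | none => exact h
    | some xy =>
      obtain ⟨x, y⟩ := xy
      by_cases hb : 0 ≤ x ∧ x ≤ n ∧ 0 ≤ y ∧ y ≤ n
      · simp only [hb, if_true]
        intro r hr
        rw [List.modify_eq_set_getElem?] at hr
        cases hg : grid[y.toNat]? with
        | none => rw [hg] at hr; simp at hr; exact h r hr
        | some row =>
          rw [hg] at hr
          simp at hr
          rcases List.mem_or_eq_of_mem_set hr with hm | he
          · exact h r hm
          · subst he; rw [List.length_set]; exact h row (List.mem_of_getElem? hg)
      · simp only [hb, if_false]; exact h

lemma cellB (n : Int) (lines : List String) :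
    ∀ (grid : List (List Char)) (i j : Nat),
      grid.length = (n + 1).toNat → (∀ r ∈ grid, r.length = (n + 1).toNat) →
      i < (n + 1).toNat → j < (n + 1).toNat →
      ((lines.foldl (pvStepB n) grid)[i]?.bind (fun r => r[j]?)) =
        (if ((i : Int), (j : Int)) ∈ pvPairs lines n then some '#'
         else grid[i]?.bind (fun r => r[j]?)) := by
  induction lines with
  | nil => intro grid i j _ _ _ _; simp [pvPairs]
  | cons line rest ih =>
    intro grid i j hlen hrow hi hj
    rw [List.foldl_cons]
    have hlen' : (pvStepB n grid line).length = (n + 1).toNat := by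
      have := lengthB n [line] grid; simpa using this.trans hlen
    have hrow' : ∀ r ∈ pvStepB n grid line, r.length = (n + 1).toNat := by
      have := rowLenB n [line] grid _ hrow; simpa using this
    rw [ih (pvStepB n grid line) i j hlen' hrow' hi hj]
    cases hp : pvParseXY line with
    | none =>
      have hpc : pvPairs (line :: rest) n = pvPairs rest n := by
        simp [pvPairs, List.filterMap_cons, hp]
      have hs : pvStepB n grid line = grid := by unfold pvStepB; rw [hp]
      rw [hpc, hs]
    | some xy =>
      obtain ⟨x, y⟩ := xy
      have hpc : pvPairs (line :: rest) n =
          if 0 ≤ x ∧ x ≤ n ∧ 0 ≤ y ∧ y ≤ n then (y, x) :: pvPairs rest n else pvPairs rest n := by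
        by_cases hb' : 0 ≤ x ∧ x ≤ n ∧ 0 ≤ y ∧ y ≤ n <;>
          simp [pvPairs, List.filterMap_cons, hp, hb']
      have hs : pvStepB n grid line =
          if 0 ≤ x ∧ x ≤ n ∧ 0 ≤ y ∧ y ≤ n then
            grid.modify y.toNat (fun row => row.set x.toNat '#') else grid := by
        unfold pvStepB; rw [hp]
      rw [hs]
      by_cases hb : 0 ≤ x ∧ x ≤ n ∧ 0 ≤ y ∧ y ≤ n
      · rw [if_pos hb, hpc, if_pos hb]
        obtain ⟨hx0, hxn, hy0, hyn⟩ := hb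
        obtain ⟨row, hg⟩ : ∃ row, grid[i]? = some row :=
          ⟨grid[i]'(by omega), List.getElem?_eq_getElem (by omega)⟩
        have hrlen : row.length = (n + 1).toNat := hrow row (List.mem_of_getElem? hg)
        by_cases hmem : ((i : Int), (j : Int)) ∈ pvPairs rest n
        · rw [if_pos hmem, if_pos (List.mem_cons_of_mem _ hmem)]
        · by_cases heq : ((i : Int), (j : Int)) = (y, x)
          · have hyi : y.toNat = i := by
              have h1 : y = (i : Int) := ((Prod.mk.injEq _ _ _ _).mp heq).1.symm
              omega
            have hxj : x.toNat = j := by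
              have h2 : x = (j : Int) := ((Prod.mk.injEq _ _ _ _).mp heq).2.symm
              omega
            rw [if_neg hmem, if_pos (by rw [List.mem_cons]; left; exact heq)]
            rw [List.getElem?_modify, hg, hyi, hxj]
            simp [List.getElem?_set, hrlen, hj]
          · rw [if_neg hmem, if_neg (by rw [List.mem_cons]; push Not; exact ⟨heq, hmem⟩)]
            rw [List.getElem?_modify, hg]
            by_cases hyi : y.toNat = i
            · have hxj : x.toNat ≠ j := by
                intro hxj
                apply heq
                have h1 : y = (i : Int) := by omega
                have h2 : x = (j : Int) := by omega
                rw [h1, h2]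
              simp [hyi, List.getElem?_set, hxj]
            · simp [hyi]
      · rw [if_neg hb, hpc, if_neg hb]

lemma gridB_eq (n : Int) (lines : List String) :
    lines.foldl (pvStepB n)
        (List.replicate (n + 1).toNat (List.replicate (n + 1).toNat '.')) =
      (List.range (n + 1).toNat).map (fun (i : Nat) =>
        (List.range (n + 1).toNat).map (fun (j : Nat) =>
          if ((i : Int), (j : Int)) ∈ pvPairs lines n then '#' else '.')) := by
  set N := (n + 1).toNat with hN
  set grid0 : List (List Char) := List.replicate N (List.replicate N '.') with hg0
  have hlen0 : grid0.length = N := by simp [hg0]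
  have hrow0 : ∀ r ∈ grid0, r.length = N := by
    intro r hr; rw [List.eq_of_mem_replicate hr]; simp
  have hlenF : (lines.foldl (pvStepB n) grid0).length = N := by
    rw [lengthB, hlen0]
  apply List.ext_getElem?
  intro i
  by_cases hi : i < N
  · obtain ⟨rowL, hL⟩ : ∃ r, (lines.foldl (pvStepB n) grid0)[i]? = some r :=
      ⟨_, List.getElem?_eq_getElem (by omega)⟩
    have hrowL : rowL.length = N :=
      rowLenB n lines grid0 N hrow0 rowL (List.mem_of_getElem? hL)
    rw [hL, List.getElem?_map, List.getElem?_range hi]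
    simp only [Option.map_some]
    congr 1
    apply List.ext_getElem?
    intro j
    by_cases hj : j < N
    · have hc := cellB n lines grid0 i j hlen0 hrow0 hi hj
      rw [hL] at hc
      simp only [Option.bind_some] at hc
      rw [hc, List.getElem?_map, List.getElem?_range hj]
      have hg0i : grid0[i]? = some (List.replicate N '.') := by
        rw [hg0, List.getElem?_replicate]; simp [hi]
      rw [hg0i]
      simp only [Option.bind_some, List.getElem?_replicate]
      by_cases hm : ((i : Int), (j : Int)) ∈ pvPairs lines n <;> simp [hm, hj]
    · rw [List.getElem?_eq_none (by omega), List.getElem?_eq_none (by simp; omega)]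
  · rw [List.getElem?_eq_none (by omega), List.getElem?_eq_none (by simp; omega)]

def joinNL : List (List Char) → List Char
  | [] => []
  | [x] => x
  | x :: y :: ys => x ++ '\n' :: joinNL (y :: ys)

lemma joinNL_cons (x : List Char) (ys : List (List Char)) (h : ys ≠ []) :
    joinNL (x :: ys) = x ++ '\n' :: joinNL ys := by
  cases ys with
  | nil => exact absurd rfl h
  | cons y ys => rfl

lemma goNil (fuel : Nat) (cur : List Char) (acc : List (List Char)) :
    PySem.Chars.splitOn.go ['\n'] fuel [] cur acc = (cur.reverse :: acc).reverse := by
  cases fuel <;> simp [PySem.Chars.splitOn.go]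

lemma goNewline (fuel : Nat) (r cur : List Char) (acc : List (List Char)) :
    PySem.Chars.splitOn.go ['\n'] (fuel + 1) ('\n' :: r) cur acc =
      PySem.Chars.splitOn.go ['\n'] fuel r [] (cur.reverse :: acc) := by
  simp [PySem.Chars.splitOn.go, List.isPrefixOf]

lemma goSkip (a : List Char) (h : '\n' ∉ a) :
    ∀ (fuel : Nat) (r cur : List Char) (acc : List (List Char)),
      (a ++ r).length ≤ fuel →
      PySem.Chars.splitOn.go ['\n'] fuel (a ++ r) cur acc =
        PySem.Chars.splitOn.go ['\n'] (fuel - a.length) r (a.reverse ++ cur) acc := by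
  induction a with
  | nil => intro fuel r cur acc _; simp
  | cons c a ih =>
    intro fuel r cur acc hfuel
    have hc : c ≠ '\n' := fun hc => h (hc ▸ List.mem_cons_self)
    have ha : '\n' ∉ a := fun hm => h (List.mem_cons_of_mem _ hm)
    obtain ⟨f, rfl⟩ : ∃ f, fuel = f + 1 := ⟨fuel - 1, by simp at hfuel; omega⟩
    have hstep : PySem.Chars.splitOn.go ['\n'] (f + 1) (c :: (a ++ r)) cur acc =
        PySem.Chars.splitOn.go ['\n'] f (a ++ r) (c :: cur) acc := by
      simp only [PySem.Chars.splitOn.go, List.isPrefixOf, Bool.and_eq_true, beq_iff_eq]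
      rw [if_neg (by simp; intro h'; exact absurd h'.symm hc)]
    rw [List.cons_append, hstep, ih ha f r (c :: cur) acc (by simp at hfuel ⊢; omega)]
    have h1 : f - a.length = f + 1 - (c :: a).length := by simp
    have h2 : (c :: a).reverse ++ cur = a.reverse ++ (c :: cur) := by simp
    rw [← h1, ← h2]
lemma goJoin : ∀ (parts : List (List Char)) (p0 : List Char),
    (∀ p ∈ p0 :: parts, '\n' ∉ p) →
    ∀ (cur : List Char) (acc : List (List Char)) (fuel : Nat),
      (joinNL (p0 :: parts)).length + 1 ≤ fuel →
      PySem.Chars.splitOn.go ['\n'] fuel (joinNL (p0 :: parts)) cur acc =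
        acc.reverse ++ ((cur.reverse ++ p0) :: parts) := by
  intro parts
  induction parts with
  | nil =>
    intro p0 h cur acc fuel hfuel
    have : joinNL [p0] = p0 ++ [] := by simp [joinNL]
    rw [this, goSkip p0 (h p0 List.mem_cons_self) fuel [] cur acc (by simp [joinNL] at hfuel ⊢; omega),
      goNil]
    simp
  | cons p1 rest ih =>
    intro p0 h cur acc fuel hfuel
    rw [joinNL_cons p0 (p1 :: rest) (by simp)] at hfuel ⊢
    rw [goSkip p0 (h p0 List.mem_cons_self) fuel _ cur acc (by simp at hfuel ⊢; omega)]
    obtain ⟨f, hf⟩ : ∃ f, fuel - p0.length = f + 1 := ⟨fuel - p0.length - 1, by simp at hfuel; omega⟩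
    rw [hf, goNewline]
    rw [ih p1 (by intro p hp; exact h p (by simp at hp ⊢; tauto)) [] _ f (by simp at hfuel ⊢; omega)]
    simp

lemma splitOn_joinNL (parts : List (List Char)) (hne : parts ≠ [])
    (h : ∀ p ∈ parts, '\n' ∉ p) :
    PySem.Chars.splitOn (joinNL parts) ['\n'] = parts := by
  cases parts with
  | nil => exact absurd rfl hne
  | cons p0 rest =>
    unfold PySem.Chars.splitOn
    rw [goJoin rest p0 h [] [] ((joinNL (p0 :: rest)).length + 1) le_rfl]
    simp

lemma mapSingleton {α β : Type} (f : α → β) (l : List α) :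
    l.flatMap (fun x => [f x]) = l.map f := by
  induction l <;> simp_all

lemma flatJoin (l : List Int) (g : Int → List Char) (b : List Char) :
    l.flatMap (fun i => g i ++ ['\n']) ++ b = joinNL (l.map g ++ [b]) := by
  induction l with
  | nil => simp [joinNL]
  | cons a l ih =>
    rw [List.map_cons, List.cons_append, joinNL_cons _ _ (by simp), ← ih]
    simp

lemma create_grid_eq (data : List String) (lim n : Int) :
    create_grid data lim n = create_grid_alt data lim n := by
  unfold create_grid create_grid_alt
  dsimp only
  set S := PySem.List.slice data none (some lim) with hS
  set bytes : PySem.Set (Int × Int) := S.foldl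
      (fun b line =>
        match pvParseXY line with
        | some (x, y) => PySem.Set.add b (y, x)
        | none => b) PySem.Set.empty with hbytes
  set N := (n + 1).toNat with hN
  set borderL := PySem.List.pyRepeat ['#'] (n + 3) with hborder
  have hbrep : borderL = List.replicate (n + 3).toNat '#' := PySem.List.pyRepeat_singleton '#' (n + 3)
  set rowF : Int → List Char := fun i =>
    (PySem.List.pyRange 0 (n + 1)).map
      (fun j => if PySem.Set.contains bytes (i, j) then '#' else '.') with hrowF
  -- contains ↔ pvPairs membership at in-range cells
  have hcont : ∀ i j : Int, 0 ≤ i → i ≤ n → 0 ≤ j → j ≤ n →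
      PySem.Set.contains bytes (i, j) = decide ((i, j) ∈ pvPairs S n) := by
    intro i j hi0 hin hj0 hjn
    have hiff : (i, j) ∈ bytes ↔ (i, j) ∈ pvPairs S n := by
      rw [hbytes, memA]
      simp only [PySem.Set.empty]
      rw [mem_pairs_iff S n i j hi0 hin hj0 hjn]
      simp
    by_cases hm : (i, j) ∈ pvPairs S n
    · simp only [hm, decide_true]
      exact (PySem.Set.contains_iff _ _).mpr (hiff.mpr hm)
    · simp only [hm, decide_false]
      rw [← Bool.not_eq_true, PySem.Set.contains_iff]
      exact fun hc => hm (hiff.mp hc)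
  -- normalize A's string build
  have houter :
      (PySem.List.pyRange 0 (n + 1)).foldl
        (fun g i =>
          (PySem.List.pyRange 0 (n + 1)).foldl
            (fun g j =>
              if PySem.Set.contains bytes (i, j) then g ++ ['#'] else g ++ ['.'])
            (g ++ ['#']) ++ ['#', '\n'])
        (borderL ++ ['\n']) =
      (borderL ++ ['\n']) ++
        (PySem.List.pyRange 0 (n + 1)).flatMap (fun i => ('#' :: rowF i ++ ['#']) ++ ['\n']) := by
    rw [PySem.List.foldl_congr_mem (PySem.List.pyRange 0 (n + 1)) _
      (fun g i => g ++ (('#' :: rowF i ++ ['#']) ++ ['\n'])) (borderL ++ ['\n'])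
      (by
        intro g i _
        rw [PySem.List.foldl_congr_mem (PySem.List.pyRange 0 (n + 1)) _
          (fun g j => g ++ [if PySem.Set.contains bytes (i, j) then '#' else '.']) (g ++ ['#'])
          (by intro g' j _; dsimp only; split <;> rfl)]
        rw [PySem.List.foldl_append_eq_flatMap, mapSingleton]
        simp [hrowF])]
    rw [PySem.List.foldl_append_eq_flatMap]
  rw [houter]
  rw [List.append_assoc, flatJoin]
  rw [List.append_assoc borderL ['\n'], List.singleton_append, ← joinNL_cons borderL _ (by simp)]
  rw [splitOn_joinNL _ (by simp) ?nonl]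
  case nonl =>
    intro p hp
    rcases List.mem_cons.mp hp with rfl | hp
    · rw [hbrep]; intro hm; exact absurd (List.eq_of_mem_replicate hm) (by decide)
    · rcases List.mem_append.mp hp with hp | hp
      · obtain ⟨i, _, rfl⟩ := List.mem_map.mp hp
        intro hm
        rcases List.mem_cons.mp hm with h' | h'
        · exact absurd h' (by decide)
        · rcases List.mem_append.mp h' with h'' | h''
          · obtain ⟨j, _, hj⟩ := List.mem_map.mp h''
            revert hj; split <;> (intro hj; exact absurd hj.symm (by decide))
          · exact absurd (List.mem_singleton.mp h'') (by decide)
      · rw [List.mem_singleton.mp hp, hbrep]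
        intro hm; exact absurd (List.eq_of_mem_replicate hm) (by decide)
  -- identify B's fold and grid
  have hBfold :
      S.foldl
        (fun grid line =>
          match pvParseXY line with
          | some (x, y) =>
              if 0 ≤ x ∧ x ≤ n ∧ 0 ≤ y ∧ y ≤ n then
                grid.modify y.toNat (fun row => row.set x.toNat '#')
              else grid
          | none => grid)
        (List.replicate N (List.replicate N '.')) =
      (List.range N).map (fun (i : Nat) =>
        (List.range N).map (fun (j : Nat) =>
          if ((i : Int), (j : Int)) ∈ pvPairs S n then '#' else '.')) := by
    exact gridB_eq n S
  rw [hBfold]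
  simp only [List.map_append, List.map_cons, List.map_map, List.map_nil]
  congr 1
  rw [PySem.List.pyRange_zero (n + 1), List.map_map]
  congr 1
  apply List.map_congr_left
  intro k hk
  have hkN : k < N := List.mem_range.mp hk
  have hk0 : (0 : Int) ≤ (k : Int) := by positivity
  have hkn : (k : Int) ≤ n := by omega
  simp only [Function.comp_apply]
  congr 1
  simp only [hrowF]
  rw [PySem.List.pyRange_zero (n + 1), List.map_map]
  congr 1
  congr 1
  apply List.map_congr_left
  intro j hj
  have hjN : j < N := List.mem_range.mp hj
  have hj0 : (0 : Int) ≤ (j : Int) := by positivity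
  have hjn : (j : Int) ≤ n := by omega
  simp only [Function.comp_apply]
  rw [hcont _ _ hk0 hkn hj0 hjn]
  simp

-- ===== VERDICT (by name: the statement is the Claim_ definition above) =====
theorem create_grid_spec : Claim_equal_create_grid := by
  intro data lim n _ _
  unfold Spec_create_grid
  exact create_grid_eq data lim n
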